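-- pv_equiv track=rewrite | github.com/DistrictOfRyan/tulsagays | tools/inject_community_events.py | inject_into_day
-- ===== SOURCE A (Python) =====
-- def inject_into_day(html: str, day_comment: str, card_html: str) -> str:
--     """Find the events-list div under `day_comment` and prepend card_html inside it."""
--     # Find the day comment
--     comment_pos = html.find(day_comment)
--     if comment_pos == -1:
--         return html
--
--     # Find the next events-list opening tag after the comment
--     search_from = comment_pos + len(day_comment)
--     events_list_tag = '<div class="events-list">'
--     tag_pos = html.find(events_list_tag, search_from)
--
--     # Make sure we haven't jumped past the next day comment
--     next_day_comments = [
--         '<!-- MONDAY -->', '<!-- TUESDAY -->', '<!-- WEDNESDAY -->',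
--         '<!-- THURSDAY -->', '<!-- FRIDAY -->', '<!-- SATURDAY -->', '<!-- SUNDAY -->',
--     ]
--     for nd in next_day_comments:
--         if nd == day_comment:
--             continue
--         nd_pos = html.find(nd, search_from)
--         if nd_pos != -1 and nd_pos < tag_pos:
--             return html  # events-list found in wrong section
--
--     if tag_pos == -1:
--         return html
--
--     insert_pos = tag_pos + len(events_list_tag)
--     return html[:insert_pos] + '\n' + card_html + '\n' + html[insert_pos:]
-- ===== SOURCE B (Python) =====
-- _DAY_COMMENTS = (
--     '<!-- MONDAY -->', '<!-- TUESDAY -->', '<!-- WEDNESDAY -->',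
--     '<!-- THURSDAY -->', '<!-- FRIDAY -->', '<!-- SATURDAY -->', '<!-- SUNDAY -->',
-- )
-- _TAG = '<div class="events-list">'
--
--
-- def inject_into_day(html: str, day_comment: str, card_html: str) -> str:
--     """Find the events-list div under `day_comment` and prepend card_html inside it."""
--     comment_pos = html.find(day_comment)
--     if comment_pos == -1:
--         return html
--     others = [d for d in _DAY_COMMENTS if d != day_comment]
--     # Single left-to-right scan: whichever comes first decides.
--     i = comment_pos + len(day_comment)
--     while i < len(html):
--         if html.startswith(_TAG, i):
--             j = i + len(_TAG)
--             return html[:j] + '\n' + card_html + '\n' + html[j:]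
--         if any(html.startswith(d, i) for d in others):
--             return html  # another day's section starts before any events-list
--         i += 1
--     return html
-- ===== Notes on version B (the rewrite author's own statement) =====
-- stated objective: alternative
-- what changed: A makes up to eight separate str.find passes (find the tag globally, then re-scan the document for each of the seven weekday comments and validate positions); B makes ONE left-to-right scan from the end of the day comment, testing startswith at each index, and decides by whichever pattern appears first: the events-list tag (splice there) or any other weekday comment (return unchanged).
import Mathlib
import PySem

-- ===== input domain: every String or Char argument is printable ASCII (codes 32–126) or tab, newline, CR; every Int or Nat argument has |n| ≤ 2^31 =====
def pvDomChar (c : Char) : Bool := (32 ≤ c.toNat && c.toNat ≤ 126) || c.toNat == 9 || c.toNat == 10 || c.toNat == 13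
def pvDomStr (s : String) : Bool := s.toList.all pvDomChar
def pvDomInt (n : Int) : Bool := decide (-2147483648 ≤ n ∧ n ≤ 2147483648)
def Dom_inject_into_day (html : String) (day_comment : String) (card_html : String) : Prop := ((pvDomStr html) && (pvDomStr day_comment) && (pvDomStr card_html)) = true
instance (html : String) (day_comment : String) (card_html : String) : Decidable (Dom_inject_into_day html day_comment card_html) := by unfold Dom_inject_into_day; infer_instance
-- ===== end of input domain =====

-- A makes separate str.find passes (find the tag, then re-scan for each of the seven
-- weekday comments and compare positions); B makes ONE left-to-right index scan from the
-- end of the day comment and decides by whichever pattern starts first — the events-list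
-- tag (splice) or any other weekday comment (unchanged). Objective: alternative; return
-- values proved equal on all inputs.

-- ===== PORT A =====
def pvDayComments : List String :=
  ["<!-- MONDAY -->", "<!-- TUESDAY -->", "<!-- WEDNESDAY -->",
   "<!-- THURSDAY -->", "<!-- FRIDAY -->", "<!-- SATURDAY -->", "<!-- SUNDAY -->"]

def pvEventsTag : String := "<div class=\"events-list\">"

-- A's `for nd in next_day_comments:` loop with its early `return html` (= true)
def pvWrongSection (html : String) (day_comment : String) (search_from : Int)
    (tag_pos : Int) : List String → Bool
  | [] => false
  | nd :: rest =>
    if nd = day_comment then pvWrongSection html day_comment search_from tag_pos rest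
    else
      let nd_pos := PySem.Str.findFrom html nd search_from
      if nd_pos ≠ -1 ∧ nd_pos < tag_pos then true
      else pvWrongSection html day_comment search_from tag_pos rest

def inject_into_day (html : String) (day_comment : String) (card_html : String) : String :=
  let comment_pos := PySem.Str.find html day_comment
  if comment_pos = -1 then html
  else
    let search_from := comment_pos + PySem.Str.len day_comment
    let tag_pos := PySem.Str.findFrom html pvEventsTag search_from
    if pvWrongSection html day_comment search_from tag_pos pvDayComments then html
    else if tag_pos = -1 then html
    else
      let insert_pos := tag_pos + PySem.Str.len pvEventsTag
      PySem.Str.slice html none (some insert_pos) ++ "\n" ++ card_html ++ "\n" ++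
        PySem.Str.slice html (some insert_pos) none

-- ===== PORT B =====
-- B's `while i < len(html):` loop; `some j` = splice position `j = i + len(_TAG)`,
-- `none` = the two `return html` exits (another day's comment first, or end of string).
-- `html.startswith(pat, i)` is exactly `pat.isPrefixOf (s.drop i)` for 0 ≤ i ≤ len.
def pvScanB (s : List Char) (others : List (List Char)) (i : Nat) : Option Nat :=
  if _h : i < s.length then
    if pvEventsTag.toList.isPrefixOf (s.drop i) then some (i + pvEventsTag.toList.length)
    else if others.any (fun d => d.isPrefixOf (s.drop i)) then none
    else pvScanB s others (i + 1)
  else none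
termination_by s.length - i

def inject_into_day_alt (html : String) (day_comment : String) (card_html : String) : String :=
  let comment_pos := PySem.Str.find html day_comment
  if comment_pos = -1 then html
  else
    let others := (pvDayComments.filter (fun d => d != day_comment)).map String.toList
    match pvScanB html.toList others (comment_pos + PySem.Str.len day_comment).toNat with
    | none => html
    | some j =>
        PySem.Str.slice html none (some (j : Int)) ++ "\n" ++ card_html ++ "\n" ++
          PySem.Str.slice html (some (j : Int)) none

-- ===== PRECONDITION & SPEC =====
def Spec_inject_into_day (html : String) (day_comment : String) (card_html : String) (out : String) : Prop := out = inject_into_day_alt html day_comment card_html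
instance (html : String) (day_comment : String) (card_html : String) (out : String) : Decidable (Spec_inject_into_day html day_comment card_html out) := by unfold Spec_inject_into_day; infer_instance

-- ===== CLAIM (what is proved, stated in full; the proofs are below) =====
def Claim_equal_inject_into_day : Prop := ∀ (html : String) (day_comment : String) (card_html : String), Dom_inject_into_day html day_comment card_html → Spec_inject_into_day html day_comment card_html (inject_into_day html day_comment card_html)

-- ===== LEMMAS AND PROOFS =====

theorem pvWrongSection_iff (html : String) (day_comment : String) (sf tp : Int)
    (l : List String) :
    pvWrongSection html day_comment sf tp l = true ↔
      ∃ nd ∈ l, nd ≠ day_comment ∧ PySem.Str.findFrom html nd sf ≠ -1 ∧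
        PySem.Str.findFrom html nd sf < tp := by
  induction l with
  | nil => simp [pvWrongSection]
  | cons nd rest ih =>
    by_cases h : nd = day_comment
    · rw [pvWrongSection, if_pos h, ih]
      constructor
      · rintro ⟨m, hm, hrest⟩; exact ⟨m, List.mem_cons_of_mem _ hm, hrest⟩
      · rintro ⟨m, hm, hne, hrest⟩
        rcases List.mem_cons.mp hm with rfl | hm
        · exact absurd h hne
        · exact ⟨m, hm, hne, hrest⟩
    · rw [pvWrongSection, if_neg h]
      by_cases h2 : PySem.Str.findFrom html nd sf ≠ -1 ∧ PySem.Str.findFrom html nd sf < tp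
      · simp only [if_pos h2, true_iff]
        exact ⟨nd, List.mem_cons_self, h, h2⟩
      · rw [if_neg h2, ih]
        constructor
        · rintro ⟨m, hm, hrest⟩; exact ⟨m, List.mem_cons_of_mem _ hm, hrest⟩
        · rintro ⟨m, hm, hne, hrest⟩
          rcases List.mem_cons.mp hm with rfl | hm
          · exact absurd hrest h2
          · exact ⟨m, hm, hne, hrest⟩

-- if sub has an occurrence at p ≥ k it is an infix of s.drop k
theorem pv_infix_of_prefix_drop (s sub : List Char) (k p : Nat) (hk : k ≤ p)
    (h : sub <+: s.drop p) : sub <:+: s.drop k := by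
  have : s.drop p = (s.drop k).drop (p - k) := by
    rw [List.drop_drop]; congr 1; omega
  rw [this] at h
  exact h.isInfix.trans (List.drop_suffix _ _).isInfix

-- stepping the scan start past a non-occurrence does not change findFrom
theorem pv_findFrom_step (s sub : List Char) (k : Nat) (hk : k < s.length)
    (hnp : ¬ sub <+: s.drop k) :
    PySem.Chars.findFrom s sub (↑k) none = PySem.Chars.findFrom s sub (↑(k + 1)) none := by
  have hk1 : k + 1 ≤ s.length := hk
  by_cases hb : PySem.Chars.findFrom s sub (↑(k + 1)) none = -1
  · rw [hb]
    rw [PySem.Chars.findFrom_natCast_eq_neg_one_iff s sub (k+1) hk1] at hb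
    rw [PySem.Chars.findFrom_natCast_eq_neg_one_iff s sub k (le_of_lt hk)]
    intro hinf
    -- an infix of s.drop k is a prefix at some p ≥ k
    obtain ⟨j, hj⟩ := (PySem.Chars.exists_prefix_drop_iff_isIn sub (s.drop k)).mpr
      ((PySem.Chars.isIn_iff_infix sub (s.drop k)).mpr hinf)
    rw [List.drop_drop] at hj
    rcases Nat.eq_or_lt_of_le (Nat.le_add_right k j) with heq | hlt
    · exact hnp (by rwa [← heq] at hj)
    · exact hb (pv_infix_of_prefix_drop s sub (k+1) (k+j) hlt hj)
  · obtain ⟨hble, hbp, hbmin⟩ := PySem.Chars.findFrom_natCast_spec s sub (k+1) hk1 hb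
    have ha : PySem.Chars.findFrom s sub (↑k) none ≠ -1 := fun h =>
      ((PySem.Chars.findFrom_natCast_eq_neg_one_iff s sub k (le_of_lt hk)).mp h)
        (pv_infix_of_prefix_drop s sub k _ (by omega) hbp)
    obtain ⟨hale, hap, hamin⟩ := PySem.Chars.findFrom_natCast_spec s sub k (le_of_lt hk) ha
    set a := PySem.Chars.findFrom s sub (↑k) none with hadef
    set b := PySem.Chars.findFrom s sub (↑(k+1)) none with hbdef
    have ha0 : 0 ≤ a := le_trans (by exact_mod_cast Nat.zero_le k) hale
    have hb0 : 0 ≤ b := le_trans (by exact_mod_cast Nat.zero_le (k+1)) hble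
    have hank : a.toNat ≠ k := by
      intro h; exact hnp (by rwa [h] at hap)
    have hak1 : (k + 1 : Int) ≤ a := by
      have : (k : Int) ≤ a := hale
      omega
    rcases lt_trichotomy a b with h | h | h
    · exact absurd hap (hbmin a.toNat (by omega) (by omega))
    · exact h
    · exact absurd hbp (hamin b.toNat (by omega) (by omega))

-- characterization of B's scan in terms of A's findFrom-based quantities
theorem pvScanB_eq (s : List Char) (others : List (List Char)) (i : Nat)
    (hi : i ≤ s.length) :
    pvScanB s others i =
      (let t := PySem.Chars.findFrom s pvEventsTag.toList (↑i) none
       if t = -1 ∨ (∃ d ∈ others, PySem.Chars.findFrom s d (↑i) none ≠ -1 ∧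
            PySem.Chars.findFrom s d (↑i) none < t) then none
       else some (t.toNat + pvEventsTag.toList.length)) := by
  simp only []
  induction hn : s.length - i generalizing i with
  | zero =>
    have hie : i = s.length := by omega
    rw [pvScanB, dif_neg (by omega)]
    have ht : PySem.Chars.findFrom s pvEventsTag.toList (↑i) none = -1 := by
      rw [PySem.Chars.findFrom_natCast_eq_neg_one_iff s _ i hi, hie,
        List.drop_length]
      intro h
      have := h.length_le
      simp [pvEventsTag] at this
    rw [if_pos (Or.inl ht)]
  | succ n ih =>
    have hilt : i < s.length := by omega
    rw [pvScanB, dif_pos hilt]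
    by_cases htag : pvEventsTag.toList.isPrefixOf (s.drop i)
    · rw [if_pos htag]
      have htagp : pvEventsTag.toList <+: s.drop i := List.isPrefixOf_iff_prefix.mp htag
      -- findFrom at i is exactly i
      have ht : PySem.Chars.findFrom s pvEventsTag.toList (↑i) none ≠ -1 := fun h =>
        ((PySem.Chars.findFrom_natCast_eq_neg_one_iff s _ i (le_of_lt hilt)).mp h)
          htagp.isInfix
      obtain ⟨htle, htp, htmin⟩ :=
        PySem.Chars.findFrom_natCast_spec s pvEventsTag.toList i (le_of_lt hilt) ht
      set t := PySem.Chars.findFrom s pvEventsTag.toList (↑i) none with htdef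
      have ht0 : 0 ≤ t := le_trans (by exact_mod_cast Nat.zero_le i) htle
      have hti : t = (i : Int) := by
        rcases Nat.lt_or_ge i t.toNat with h | h
        · exact absurd htagp (htmin i (le_refl i) h)
        · omega
      rw [if_neg]
      · rw [hti]; simp
      · rintro (h | ⟨d, hd, hne, hlt⟩)
        · exact ht h
        · obtain ⟨hdle, _, _⟩ :=
            PySem.Chars.findFrom_natCast_spec s d i (le_of_lt hilt) hne
          omega
    · rw [if_neg htag]
      have htagnp : ¬ pvEventsTag.toList <+: s.drop i :=
        fun h => htag (List.isPrefixOf_iff_prefix.mpr h)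
      by_cases hoth : others.any (fun d => d.isPrefixOf (s.drop i)) = true
      · rw [if_pos hoth]
        obtain ⟨d, hd, hdp⟩ := List.any_eq_true.mp hoth
        have hdp : d <+: s.drop i := List.isPrefixOf_iff_prefix.mp hdp
        -- d is found exactly at i
        have hdne : PySem.Chars.findFrom s d (↑i) none ≠ -1 := fun h =>
          ((PySem.Chars.findFrom_natCast_eq_neg_one_iff s d i (le_of_lt hilt)).mp h)
            hdp.isInfix
        obtain ⟨hdle, hdpr, hdmin⟩ :=
          PySem.Chars.findFrom_natCast_spec s d i (le_of_lt hilt) hdne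
        set q := PySem.Chars.findFrom s d (↑i) none with hqdef
        have hq0 : 0 ≤ q := le_trans (by exact_mod_cast Nat.zero_le i) hdle
        have hqi : q = (i : Int) := by
          rcases Nat.lt_or_ge i q.toNat with h | h
          · exact absurd hdp (hdmin i (le_refl i) h)
          · omega
        by_cases ht : PySem.Chars.findFrom s pvEventsTag.toList (↑i) none = -1
        · rw [if_pos (Or.inl ht)]
        · obtain ⟨htle, htp, htmin⟩ :=
            PySem.Chars.findFrom_natCast_spec s pvEventsTag.toList i (le_of_lt hilt) ht
          set t := PySem.Chars.findFrom s pvEventsTag.toList (↑i) none with htdef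
          have ht0 : 0 ≤ t := le_trans (by exact_mod_cast Nat.zero_le i) htle
          have hti : t ≠ (i : Int) := by
            intro h
            exact htagnp (by simpa [h, Int.toNat_natCast] using htp)
          rw [if_pos (Or.inr ⟨d, hd, hdne, by omega⟩)]
      · rw [if_neg hoth]
        have hstep := ih (i + 1) (by omega) (by omega)
        rw [hstep]
        -- all findFrom values agree between i and i+1
        have htagstep := pv_findFrom_step s pvEventsTag.toList i hilt htagnp
        have hothstep : ∀ d ∈ others,
            PySem.Chars.findFrom s d (↑i) none = PySem.Chars.findFrom s d (↑(i+1)) none := by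
          intro d hd
          apply pv_findFrom_step s d i hilt
          intro hp
          exact (List.any_eq_true.not.mp hoth)
            ⟨d, hd, List.isPrefixOf_iff_prefix.mpr hp⟩
        rw [← htagstep]
        by_cases hc : PySem.Chars.findFrom s pvEventsTag.toList (↑i) none = -1 ∨
            (∃ d ∈ others, PySem.Chars.findFrom s d (↑(i+1)) none ≠ -1 ∧
              PySem.Chars.findFrom s d (↑(i+1)) none <
                PySem.Chars.findFrom s pvEventsTag.toList (↑i) none)
        · rw [if_pos hc, if_pos]
          rcases hc with h | ⟨d, hd, h1, h2⟩
          · exact Or.inl h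
          · exact Or.inr ⟨d, hd, by rw [hothstep d hd]; exact ⟨h1, h2⟩⟩
        · rw [if_neg hc, if_neg]
          intro h
          apply hc
          rcases h with h | ⟨d, hd, h1, h2⟩
          · exact Or.inl h
          · exact Or.inr ⟨d, hd, by rw [← hothstep d hd]; exact ⟨h1, h2⟩⟩

-- ===== VERDICT =====
theorem inject_into_day_spec : Claim_equal_inject_into_day := by
  intro html day card _
  unfold Spec_inject_into_day inject_into_day inject_into_day_alt
  simp only []
  by_cases hcp : PySem.Str.find html day = -1
  · rw [if_pos hcp, if_pos hcp]
  · rw [if_neg hcp, if_neg hcp]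
    set sf := PySem.Str.find html day + PySem.Str.len day with hsf
    -- sf is a valid Nat index into html
    have hfind : PySem.Str.find html day = PySem.Chars.find html.toList day.toList :=
      PySem.Str.find_eq html day
    have hcp0 : 0 ≤ PySem.Str.find html day := by
      have := PySem.Chars.neg_one_le_find html.toList day.toList
      omega
    have hday : day.toList <+:
        html.toList.drop (PySem.Chars.find html.toList day.toList).toNat :=
      (PySem.Chars.find_spec (s := html.toList) (sub := day.toList) (by omega)).1
    have hlen := hday.length_le
    simp only [List.length_drop] at hlen
    have hdl : PySem.Str.len day = (day.toList.length : Int) := PySem.Str.len_eq day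
    have hsf0 : 0 ≤ sf := by rw [hsf, hdl]; omega
    have hfle := PySem.Chars.find_le_length html.toList day.toList
    have hsfle : sf.toNat ≤ html.toList.length := by
      rw [hsf, hdl]; rw [hfind] at hcp0 ⊢; omega
    have hsfk : sf = ((sf.toNat : Nat) : Int) := by omega
    rw [pvScanB_eq html.toList _ sf.toNat hsfle]
    simp only []
    set t := PySem.Chars.findFrom html.toList pvEventsTag.toList (↑sf.toNat) none with htdef
    have htA : PySem.Str.findFrom html pvEventsTag sf = t := by
      rw [PySem.Str.findFrom_eq, hsfk]
    -- the other-day condition of the two programs coincide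
    have hcond : pvWrongSection html day sf t pvDayComments = true ↔
        (∃ d ∈ (pvDayComments.filter (fun d => d != day)).map String.toList,
          PySem.Chars.findFrom html.toList d (↑sf.toNat) none ≠ -1 ∧
          PySem.Chars.findFrom html.toList d (↑sf.toNat) none < t) := by
      rw [pvWrongSection_iff]
      constructor
      · rintro ⟨nd, hm, hne, h1, h2⟩
        refine ⟨nd.toList, List.mem_map_of_mem (List.mem_filter.mpr ⟨hm, bne_iff_ne.mpr hne⟩), ?_, ?_⟩
        · rwa [PySem.Str.findFrom_eq, hsfk] at h1
        · rwa [PySem.Str.findFrom_eq, hsfk] at h2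
      · rintro ⟨d, hd, h1, h2⟩
        obtain ⟨nd, hnd, rfl⟩ := List.mem_map.mp hd
        obtain ⟨hm, hne⟩ := List.mem_filter.mp hnd
        refine ⟨nd, hm, bne_iff_ne.mp hne, ?_, ?_⟩
        · rwa [PySem.Str.findFrom_eq, hsfk]
        · rwa [PySem.Str.findFrom_eq, hsfk]
    rw [htA]
    by_cases hws : pvWrongSection html day sf t pvDayComments = true
    · rw [if_pos hws, if_pos (Or.inr (hcond.mp hws))]
    · rw [if_neg hws]
      by_cases htn : t = -1
      · rw [if_pos htn, if_pos (Or.inl htn)]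
      · rw [if_neg htn, if_neg]
        · -- both splice; positions agree
          have ht0 : 0 ≤ t := by
            obtain ⟨hle, _, _⟩ :=
              PySem.Chars.findFrom_natCast_spec html.toList pvEventsTag.toList sf.toNat hsfle htn
            have : (0:Int) ≤ (sf.toNat : Int) := by exact_mod_cast Nat.zero_le _
            omega
          have hjz : ((t.toNat + pvEventsTag.toList.length : Nat) : Int) =
              t + PySem.Str.len pvEventsTag := by
            rw [PySem.Str.len_eq]; push_cast; omega
          rw [← hjz]
        · rintro (h | h)
          · exact htn h
          · exact hws (hcond.mpr h)
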